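-- pv_equiv track=rewrite | github.com/SilasShadow/quantum-annealytic-qalice | new_sqa/run_optimizations.py | decode_best
-- ===== SOURCE A (Python) =====
-- def decode_best(sample, N, X, bin_size):
--     B = int(X // bin_size) + 2
--     fills = []
--     for t in range(N):
--         q = 0
--         for k in range(B):
--             if sample.get(f"x_{t}_{k}", 0) == 1:
--                 q += k * bin_size
--         fills.append(q)
--     return fills
-- ===== SOURCE B (Python) =====
-- def decode_best(sample, N, X, bin_size):
--     B = int(X // bin_size) + 2
--     index = {}
--     for t in range(N):
--         for k in range(B):
--             index[f"x_{t}_{k}"] = (t, k)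
--     fills = [0] * N
--     for key, v in sample.items():
--         if v == 1 and key in index:
--             t, k = index[key]
--             fills[t] += k * bin_size
--     return fills
-- ===== Notes on version B (the rewrite author's own statement) =====
-- stated objective: alternative
-- what changed: A scans the N-by-B grid doing a dict lookup per cell and appends per-bin sums; B builds the key-to-(t,k) index dict once and decodes with a single data-driven pass over the sample's entries, scattering k*bin_size into a preallocated fills array.
import Mathlib
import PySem

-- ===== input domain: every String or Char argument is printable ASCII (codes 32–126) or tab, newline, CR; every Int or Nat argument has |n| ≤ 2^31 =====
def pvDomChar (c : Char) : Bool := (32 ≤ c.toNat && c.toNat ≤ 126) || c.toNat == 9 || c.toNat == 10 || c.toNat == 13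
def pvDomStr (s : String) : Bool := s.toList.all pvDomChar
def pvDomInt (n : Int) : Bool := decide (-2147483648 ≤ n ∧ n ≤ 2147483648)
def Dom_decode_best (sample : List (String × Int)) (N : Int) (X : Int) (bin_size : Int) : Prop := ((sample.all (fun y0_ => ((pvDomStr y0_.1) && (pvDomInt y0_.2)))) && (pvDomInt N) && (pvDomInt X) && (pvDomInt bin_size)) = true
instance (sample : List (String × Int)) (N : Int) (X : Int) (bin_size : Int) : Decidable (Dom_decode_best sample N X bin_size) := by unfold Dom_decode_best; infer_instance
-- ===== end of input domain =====

-- B replaces A's N×B grid of dict lookups by building the key→(t,k) index once and making a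
-- single data-driven pass over the sample's entries (objective: alternative, not measured faster).

-- the f-string f"x_{t}_{k}" (used by both Pythons)
def mkKey (t k : Int) : String := "x_" ++ PySem.Int.toStr t ++ "_" ++ PySem.Int.toStr k

-- ===== PORT A =====
def decode_best (sample : List (String × Int)) (N : Int) (X : Int) (bin_size : Int) : List Int :=
  let d := PySem.Dict.mk sample
  let B := PySem.Int.floordiv X bin_size + 2
  (PySem.List.pyRange 0 N 1).foldl (fun fills t =>
    fills ++ [(PySem.List.pyRange 0 B 1).foldl (fun q k =>
      if d.getD (mkKey t k) 0 == 1 then q + k * bin_size else q) 0]) []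

-- ===== PORT B =====
-- index = { f"x_{t}_{k}": (t, k) }  built once by the two loops in Source B
def buildIdx (N B : Int) : PySem.Dict String (Int × Int) :=
  (PySem.List.pyRange 0 N 1).foldl (fun d t =>
    (PySem.List.pyRange 0 B 1).foldl (fun d k => d.insert (mkKey t k) (t, k)) d) PySem.Dict.empty

def decode_best_alt (sample : List (String × Int)) (N : Int) (X : Int) (bin_size : Int) : List Int :=
  let B := PySem.Int.floordiv X bin_size + 2
  let index := buildIdx N B
  let fills0 : List Int := PySem.List.pyRepeat [(0 : Int)] N
  sample.foldl (fun (fills : List Int) (kv : String × Int) =>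
    if kv.2 == 1 then
      match index.get? kv.1 with
      | some (t, k) => PySem.List.pySetD fills t (PySem.List.pyGetD fills t 0 + k * bin_size)
      | none => fills
    else fills) fills0

-- ===== PRECONDITION & SPEC =====
-- bin_size = 0 makes A raise ZeroDivisionError; an association list with duplicate keys does not
-- represent any Python dict (the argument is a dict), so those lists are excluded as well.
def Pre_decode_best (sample : List (String × Int)) (N : Int) (X : Int) (bin_size : Int) : Prop :=
  bin_size ≠ 0 ∧ (sample.map Prod.fst).Nodup
instance (sample : List (String × Int)) (N : Int) (X : Int) (bin_size : Int) : Decidable (Pre_decode_best sample N X bin_size) := by unfold Pre_decode_best; infer_instance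

def pvWitness_decode_best : (List (String × Int)) × Int × Int × Int := ([("x_0_1", 1), ("x_1_0", 0)], 2, 3, 2)

def Spec_decode_best (sample : List (String × Int)) (N : Int) (X : Int) (bin_size : Int) (out : List Int) : Prop := out = decode_best_alt sample N X bin_size
instance (sample : List (String × Int)) (N : Int) (X : Int) (bin_size : Int) (out : List Int) : Decidable (Spec_decode_best sample N X bin_size out) := by unfold Spec_decode_best; infer_instance

-- ===== CLAIM (what is proved, stated in full; the proofs are below) =====
def Claim_equal_decode_best : Prop := ∀ (sample : List (String × Int)) (N : Int) (X : Int) (bin_size : Int), Dom_decode_best sample N X bin_size → Pre_decode_best sample N X bin_size → Spec_decode_best sample N X bin_size (decode_best sample N X bin_size)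

-- ===== LEMMAS AND PROOFS =====

-- char-list view of mkKey
def chKey (t k : Int) : List Char :=
  'x' :: '_' :: (PySem.Int.toChars t ++ '_' :: PySem.Int.toChars k)

lemma toList_mkKey (t k : Int) : (mkKey t k).toList = chKey t k := by
  simp [mkKey, chKey, String.toList_append, PySem.Int.toList_toStr]

lemma digitChar_inj {a b : Nat} (ha : a < 10) (hb : b < 10) (h : a.digitChar = b.digitChar) : a = b := by
  interval_cases a <;> interval_cases b <;> simp_all [Nat.digitChar]

lemma toDigits10_inj : ∀ m n : Nat, Nat.toDigits 10 m = Nat.toDigits 10 n → m = n := by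
  intro m
  induction m using Nat.strong_induction_on with
  | _ m ih =>
    intro n h
    rw [Nat.toDigits_eq_if (n := m) (by norm_num)] at h
    rw [Nat.toDigits_eq_if (n := n) (by norm_num)] at h
    split_ifs at h with h1 h2 h2
    · exact digitChar_inj h1 h2 (List.singleton_inj.mp h)
    · have hlen := congrArg List.length h
      simp only [List.length_append, List.length_cons, List.length_nil] at hlen
      have := @Nat.length_toDigits_pos 10 (n / 10)
      omega
    · have hlen := congrArg List.length h
      simp only [List.length_append, List.length_cons, List.length_nil] at hlen
      have := @Nat.length_toDigits_pos 10 (m / 10)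
      omega
    · have h3 := List.append_inj' h (by simp)
      have hd : m / 10 = n / 10 := ih (m / 10) (by omega) _ h3.1
      have hm : m % 10 = n % 10 :=
        digitChar_inj (by omega) (by omega) (List.singleton_inj.mp h3.2)
      omega

lemma toChars_inj {m n : Int} (h : PySem.Int.toChars m = PySem.Int.toChars n) : m = n := by
  unfold PySem.Int.toChars at h
  have hdash : ∀ (j : Nat), '-' ∉ Nat.toDigits 10 j := by
    intro j hm
    have := Nat.isDigit_of_mem_toDigits (by norm_num) (by norm_num) hm
    simp [Char.isDigit] at this
  split_ifs at h with h1 h2 h2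
  · simp only [List.cons.injEq, true_and] at h
    have := toDigits10_inj _ _ h
    omega
  · exact absurd (h ▸ List.mem_cons_self) (hdash _)
  · exact absurd (h.symm ▸ List.mem_cons_self) (hdash _)
  · have := toDigits10_inj _ _ h
    omega

lemma underscore_not_mem_toChars (n : Int) : '_' ∉ PySem.Int.toChars n := by
  unfold PySem.Int.toChars
  have hd : ∀ (j : Nat), '_' ∉ Nat.toDigits 10 j := by
    intro j hm
    have := Nat.isDigit_of_mem_toDigits (by norm_num) (by norm_num) hm
    simp [Char.isDigit] at this
  split_ifs with h1
  · simp [hd]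
  · exact hd _

lemma append_marker_inj : ∀ (ds ds' es es' : List Char), '_' ∉ ds → '_' ∉ ds' →
    ds ++ '_' :: es = ds' ++ '_' :: es' → ds = ds' ∧ es = es' := by
  intro ds
  induction ds with
  | nil =>
    intro ds' es es' _ h2 h
    cases ds' with
    | nil => simpa using h
    | cons c cs =>
      simp at h
      exact absurd (h.1 ▸ List.mem_cons_self) h2
  | cons c cs ih =>
    intro ds' es es' h1 h2 h
    cases ds' with
    | nil =>
      simp at h
      exact absurd (h.1 ▸ List.mem_cons_self) h1
    | cons c' cs' =>
      simp at h
      obtain ⟨rfl, h⟩ := h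
      have := ih cs' es es' (by simp_all) (by simp_all) h
      simp_all

lemma mkKey_inj {t k t' k' : Int} (h : mkKey t k = mkKey t' k') : t = t' ∧ k = k' := by
  have hc : chKey t k = chKey t' k' := by
    rw [← toList_mkKey, ← toList_mkKey, h]
  simp only [chKey, List.cons.injEq, true_and] at hc
  have := append_marker_inj _ _ _ _ (underscore_not_mem_toChars t) (underscore_not_mem_toChars t') hc
  exact ⟨toChars_inj this.1, toChars_inj this.2⟩

-- the grid as a flat list of pairs
def gridL (N B : Int) : List (Int × Int) :=
  (PySem.List.pyRange 0 N 1).flatMap (fun t => (PySem.List.pyRange 0 B 1).map (fun k => (t, k)))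

lemma gridL_nodup (N B : Int) : (gridL N B).Nodup := by
  unfold gridL
  rw [List.nodup_flatMap]
  constructor
  · intro t _
    exact (PySem.List.nodup_pyRange_one _ _).map_on (by simp_all)
  · have := PySem.List.pairwise_lt_pyRange_one (a := 0) (b := N)
    refine this.imp ?_
    intro a b hab
    intro p hp hq
    simp at hp hq
    obtain ⟨k1, _, rfl⟩ := hp
    obtain ⟨k2, _, h2⟩ := hq
    have := congrArg Prod.fst h2
    simp at this
    omega

lemma gridL_map_key_nodup (N B : Int) : ((gridL N B).map (fun p => mkKey p.1 p.2)).Nodup := by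
  refine (gridL_nodup N B).map_on ?_
  intro x _ y _ hxy
  have := mkKey_inj hxy
  exact Prod.ext this.1 this.2

lemma mem_gridL (N B : Int) (p : Int × Int) :
    p ∈ gridL N B ↔ 0 ≤ p.1 ∧ p.1 < N ∧ 0 ≤ p.2 ∧ p.2 < B := by
  unfold gridL
  simp [PySem.List.mem_pyRange_one]
  constructor
  · rintro ⟨t, ⟨h1, h2⟩, k, ⟨h3, h4⟩, rfl⟩
    simp_all
  · intro h
    exact ⟨p.1, ⟨h.1, h.2.1⟩, p.2, ⟨h.2.2.1, h.2.2.2⟩, rfl⟩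

lemma buildIdx_items (N B : Int) :
    (buildIdx N B).items = (gridL N B).map (fun p => (mkKey p.1 p.2, p)) := by
  unfold buildIdx
  have : ((PySem.List.pyRange 0 N 1).foldl (fun d t =>
      (PySem.List.pyRange 0 B 1).foldl (fun d k => d.insert (mkKey t k) (t, k)) d) PySem.Dict.empty)
      = (gridL N B).foldl (fun d (p : Int × Int) => d.insert (mkKey p.1 p.2) p) PySem.Dict.empty := by
    unfold gridL
    rw [List.foldl_flatMap]
    congr 1
    funext d t
    rw [List.foldl_map]
  rw [this]
  have := PySem.Dict.items_foldl_insert_fresh (gridL N B) (fun p => mkKey p.1 p.2) (fun p => p)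
      PySem.Dict.empty (by intro a _; exact PySem.Dict.contains_empty _) (gridL_map_key_nodup N B)
  simpa using this

lemma buildIdx_keys_nodup (N B : Int) : (buildIdx N B).keys.Nodup := by
  have : (buildIdx N B).keys = (gridL N B).map (fun p => mkKey p.1 p.2) := by
    simp only [PySem.Dict.keys, buildIdx_items, List.map_map]
    rfl
  rw [this]
  exact gridL_map_key_nodup N B

lemma get?_buildIdx (N B : Int) (key : String) (t k : Int) :
    (buildIdx N B).get? key = some (t, k) ↔
      key = mkKey t k ∧ 0 ≤ t ∧ t < N ∧ 0 ≤ k ∧ k < B := by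
  rw [PySem.Dict.get?_eq_some_iff_mem_items _ _ _ (buildIdx_keys_nodup N B), buildIdx_items]
  simp only [List.mem_map]
  constructor
  · rintro ⟨p, hp, h⟩
    simp only [Prod.mk.injEq] at h
    obtain ⟨hk, rfl⟩ := h
    have := (mem_gridL N B _).mp hp
    exact ⟨hk.symm, this.1, this.2.1, this.2.2.1, this.2.2.2⟩
  · rintro ⟨rfl, h⟩
    exact ⟨(t, k), (mem_gridL N B (t, k)).mpr (by simp_all), rfl⟩

def wSlot (N B bs slot : Int) (kv : String × Int) : Int :=
  if kv.2 = 1 then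
    match (buildIdx N B).get? kv.1 with
    | some (t', k') => if t' = slot then k' * bs else 0
    | none => 0
  else 0

def stepB (N B bs : Int) (fills : List Int) (kv : String × Int) : List Int :=
  if kv.2 == 1 then
    match (buildIdx N B).get? kv.1 with
    | some (t, k) => PySem.List.pySetD fills t (PySem.List.pyGetD fills t 0 + k * bs)
    | none => fills
  else fills

lemma length_stepB (N B bs : Int) (fills : List Int) (kv : String × Int) :
    (stepB N B bs fills kv).length = fills.length := by
  unfold stepB
  split_ifs
  · rcases h : (buildIdx N B).get? kv.1 with _ | ⟨t, k⟩
    · simp [h]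
    · simp [h, PySem.List.length_pySetD]
  · rfl

lemma length_foldB (N B bs : Int) (sample : List (String × Int)) (fills : List Int) :
    (sample.foldl (stepB N B bs) fills).length = fills.length := by
  induction sample generalizing fills with
  | nil => rfl
  | cons kv rest ih => rw [List.foldl_cons, ih, length_stepB]

lemma stepB_getElem (N B bs : Int) (fills : List Int) (kv : String × Int)
    (hlen : fills.length = N.toNat) (t : Nat) (ht : t < fills.length) :
    (stepB N B bs fills kv)[t]? = some (fills[t] + wSlot N B bs (t : Int) kv) := by
  unfold stepB wSlot
  by_cases hv : kv.2 = 1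
  · simp only [hv, beq_self_eq_true, if_pos]
    rcases h : (buildIdx N B).get? kv.1 with _ | ⟨t', k'⟩
    · simp [h, List.getElem?_eq_getElem ht]
    · simp only [h]
      have hb := (get?_buildIdx N B kv.1 t' k').mp h
      obtain ⟨-, ht0, htN, -, -⟩ := hb
      have htl : t'.toNat < fills.length := by omega
      rw [PySem.List.pySetD_of_nonneg _ _ ht0]
      rw [List.getElem?_set]
      by_cases he : t' = (t : Int)
      · subst he
        have hg : PySem.List.pyGetD fills ((t : Int)) 0 = fills[t] := by
          rw [PySem.List.pyGetD_eq_getElem _ _ (by omega) (by omega)]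
          congr 1
        simp only [Int.toNat_natCast, if_pos rfl, if_pos ht, hg, eq_self_iff_true, if_true]
        exact rfl
      · have hne : ¬ (t'.toNat = t) := by omega
        simp [hne, he, List.getElem?_eq_getElem ht]
  · simp [hv, List.getElem?_eq_getElem ht]

lemma foldB_getElem (N B bs : Int) (sample : List (String × Int)) :
    ∀ (fills : List Int), fills.length = N.toNat → ∀ (t : Nat) (ht : t < fills.length),
    (sample.foldl (stepB N B bs) fills)[t]?
      = some (fills[t]'ht + (sample.map (wSlot N B bs (t : Int))).sum) := by
  induction sample with
  | nil => intro fills _ t ht; simp [List.getElem?_eq_getElem ht]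
  | cons kv rest ih =>
    intro fills hlen t ht
    rw [List.foldl_cons]
    have hl2 : (stepB N B bs fills kv).length = fills.length := length_stepB N B bs fills kv
    have h1 := ih (stepB N B bs fills kv) (by rw [hl2]; exact hlen) t (by rw [hl2]; exact ht)
    rw [h1]
    have h2 := stepB_getElem N B bs fills kv hlen t ht
    rw [List.getElem?_eq_getElem (by rw [hl2]; exact ht)] at h2
    have h3 := Option.some.inj h2
    rw [h3]
    simp
    ring

-- a sum over a nodup list whose function changes at exactly one point
lemma sum_map_update_one (l : List Int) (hl : l.Nodup) (k0 : Int) (h0 : k0 ∈ l)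
    (f1 f0 : Int → Int) (h : ∀ k ∈ l, k ≠ k0 → f1 k = f0 k) :
    (l.map f1).sum = f1 k0 - f0 k0 + (l.map f0).sum := by
  induction l with
  | nil => simp at h0
  | cons a rest ih =>
    simp only [List.map_cons, List.sum_cons]
    rcases List.mem_cons.mp h0 with rfl | hmem
    · have : ∀ k ∈ rest, f1 k = f0 k := by
        intro k hk
        exact h k (List.mem_cons_of_mem _ hk) (by rintro rfl; exact (List.nodup_cons.mp hl).1 hk)
      rw [List.map_congr_left this]
      ring
    · have ha : f1 a = f0 a := h a List.mem_cons_self (by rintro rfl; exact (List.nodup_cons.mp hl).1 hmem)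
      rw [ha, ih (List.nodup_cons.mp hl).2 hmem (fun k hk => h k (List.mem_cons_of_mem _ hk))]
      ring

lemma key_lemma (N B bs slot : Int) (hs0 : 0 ≤ slot) (hsN : slot < N) :
    ∀ (sample : List (String × Int)), (sample.map Prod.fst).Nodup →
    ((PySem.List.pyRange 0 B 1).map (fun k =>
        if (PySem.Dict.mk sample).getD (mkKey slot k) 0 = 1 then k * bs else 0)).sum
      = (sample.map (wSlot N B bs slot)).sum := by
  intro sample
  induction sample with
  | nil =>
    intro _
    have h0 : ∀ key : String, (PySem.Dict.mk ([] : List (String × Int))).getD key 0 = 0 := by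
      intro key; rfl
    simp [h0]
  | cons kv rest ih =>
    intro hnd
    obtain ⟨key, v⟩ := kv
    have hkey : key ∉ rest.map Prod.fst := (List.nodup_cons.mp hnd).1
    have hnd' : (rest.map Prod.fst).Nodup := (List.nodup_cons.mp hnd).2
    have hrest0 : (PySem.Dict.mk rest).getD key 0 = 0 := by
      apply PySem.Dict.getD_of_not_contains
      rw [Bool.eq_false_iff]
      intro hc
      exact hkey (by simpa [PySem.Dict.keys_mk] using (PySem.Dict.contains_iff_mem_keys _ _).mp hc)
    have hd : ∀ x : String, (PySem.Dict.mk ((key, v) :: rest)).getD x 0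
        = if key = x then v else (PySem.Dict.mk rest).getD x 0 := by
      intro x
      rw [PySem.Dict.getD_eq_get?_getD, PySem.Dict.get?_mk_cons]
      by_cases h : key = x
      · simp [h]
      · simp [h, PySem.Dict.getD_eq_get?_getD]
    by_cases hex : ∃ k0, (0 ≤ k0 ∧ k0 < B) ∧ key = mkKey slot k0
    · obtain ⟨k0, hk0, rfl⟩ := hex
      have hstep := sum_map_update_one (PySem.List.pyRange 0 B 1)
          (PySem.List.nodup_pyRange_one 0 B) k0
          ((PySem.List.mem_pyRange_one).mpr ⟨hk0.1, hk0.2⟩)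
          (fun k => if (PySem.Dict.mk ((mkKey slot k0, v) :: rest)).getD (mkKey slot k) 0 = 1 then k * bs else 0)
          (fun k => if (PySem.Dict.mk rest).getD (mkKey slot k) 0 = 1 then k * bs else 0)
          (by
            intro k _ hk
            have hne : mkKey slot k0 ≠ mkKey slot k := by
              intro h
              exact hk ((mkKey_inj h).2.symm)
            simp only
            rw [hd, if_neg hne])
      simp only at hstep
      rw [hstep, ih hnd']
      rw [hd (mkKey slot k0), if_pos rfl, hrest0]
      have hw : wSlot N B bs slot (mkKey slot k0, v) = if v = 1 then k0 * bs else 0 := by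
        unfold wSlot
        have hg : (buildIdx N B).get? (mkKey slot k0) = some (slot, k0) :=
          (get?_buildIdx N B _ slot k0).mpr ⟨rfl, hs0, hsN, hk0.1, hk0.2⟩
        by_cases hv : v = 1 <;> simp [hv, hg]
      simp only [List.map_cons, List.sum_cons, hw]
      simp
    · have hcongr : ∀ k ∈ PySem.List.pyRange 0 B 1,
          (if (PySem.Dict.mk ((key, v) :: rest)).getD (mkKey slot k) 0 = 1 then k * bs else 0)
          = (if (PySem.Dict.mk rest).getD (mkKey slot k) 0 = 1 then k * bs else 0) := by
        intro k hk
        have hne : key ≠ mkKey slot k := by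
          intro h
          exact hex ⟨k, ⟨((PySem.List.mem_pyRange_one).mp hk).1, ((PySem.List.mem_pyRange_one).mp hk).2⟩, h⟩
        rw [hd, if_neg hne]
      rw [List.map_congr_left hcongr, ih hnd']
      have hw : wSlot N B bs slot (key, v) = 0 := by
        unfold wSlot
        rcases hg : (buildIdx N B).get? key with _ | ⟨t', k'⟩
        · simp
        · have hb := (get?_buildIdx N B key t' k').mp hg
          have hne : t' ≠ slot := by
            intro h
            exact hex ⟨k', ⟨hb.2.2.2.1, hb.2.2.2.2⟩, by rw [hb.1, h]⟩
          simp [hne]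
      simp [hw]

lemma A_shape (sample : List (String × Int)) (N X bs : Int) :
    decode_best sample N X bs = (PySem.List.pyRange 0 N 1).map (fun t =>
      ((PySem.List.pyRange 0 (PySem.Int.floordiv X bs + 2) 1).map (fun k =>
        if (PySem.Dict.mk sample).getD (mkKey t k) 0 = 1 then k * bs else 0)).sum) := by
  unfold decode_best
  rw [PySem.List.foldl_append_singleton_eq_map
      (fun t => (PySem.List.pyRange 0 (PySem.Int.floordiv X bs + 2) 1).foldl (fun q k =>
        if (PySem.Dict.mk sample).getD (mkKey t k) 0 == 1 then q + k * bs else q) 0)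
      (PySem.List.pyRange 0 N 1) []]
  simp only [List.nil_append]
  apply List.map_congr_left
  intro t _
  have hc := PySem.List.foldl_congr_mem
      (l := PySem.List.pyRange 0 (PySem.Int.floordiv X bs + 2) 1) (init := (0 : Int))
      (f := fun q k => if (PySem.Dict.mk sample).getD (mkKey t k) 0 == 1 then q + k * bs else q)
      (g := fun q k => q + (if (PySem.Dict.mk sample).getD (mkKey t k) 0 = 1 then k * bs else 0))
      (by
        intro acc x _
        by_cases h : (PySem.Dict.mk sample).getD (mkKey t x) 0 = 1 <;> simp [h])
  rw [hc, PySem.List.foldl_add]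
  simp

lemma B_shape (sample : List (String × Int)) (N X bs : Int) :
    decode_best_alt sample N X bs
      = sample.foldl (stepB N (PySem.Int.floordiv X bs + 2) bs) (List.replicate N.toNat 0) := by
  unfold decode_best_alt stepB
  rw [PySem.List.pyRepeat_singleton]

-- ===== VERDICT (by name: the statement is the Claim_ definition above) =====
theorem decode_best_spec : Claim_equal_decode_best := by
  intro sample N X bin_size _ hpre
  unfold Spec_decode_best
  obtain ⟨-, hnd⟩ := hpre
  rw [A_shape, B_shape]
  apply List.ext_getElem?
  intro i
  by_cases hi : i < N.toNat
  · have hlen : (List.replicate N.toNat (0 : Int)).length = N.toNat := List.length_replicate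
    rw [foldB_getElem N (PySem.Int.floordiv X bin_size + 2) bin_size sample _ hlen i
      (by rw [hlen]; exact hi)]
    have hrange : (PySem.List.pyRange 0 N 1)[i]? = some ((0 : Int) + i) := by
      rw [PySem.List.getElem?_pyRange_one]
      simp
      omega
    rw [List.getElem?_map, hrange]
    simp only [Option.map_some, zero_add]
    rw [key_lemma N (PySem.Int.floordiv X bin_size + 2) bin_size (i : Int) (by omega) (by omega)
      sample hnd]
    simp
  · rw [List.getElem?_eq_none, List.getElem?_eq_none]
    · rw [length_foldB]
      simp
      omega
    · simp [PySem.List.length_pyRange_one]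
      omega
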